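-- pv_equiv track=rewrite | github.com/Fondamenti18/fondamenti-di-programmazione | students/1746561/homework04/program01.py | rimozione
-- ===== SOURCE A (Python) =====
-- def rimozione(fnome, x,tree):
--     for k,v in tree.copy().items():
--         if x in v: v.remove(x)
--         if k == x:
--             del tree[k]
--             for i in v:
--                 rimozione(fnome, i,tree)
--     return tree
-- ===== SOURCE B (Python) =====
-- # Same removal semantics as A, but iterative: an explicit agenda (stack) of
-- # pending removals / suspended key-scans replaces A's recursion, so no
-- # recursion-depth limit.  Mutates `tree` in place, like A, and returns it.
-- def rimozione(fnome, x, tree):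
--     agenda = [('call', x)]
--     while agenda:
--         frame = agenda.pop()
--         if frame[0] == 'call':
--             agenda.append(('scan', frame[1], list(tree), 0))
--             continue
--         _, y, snap, i = frame
--         while i < len(snap):
--             k = snap[i]
--             i += 1
--             if k in tree:
--                 v = tree[k]
--                 if y in v:
--                     v.remove(y)
--                 if k == y:
--                     del tree[k]
--                     # finish scanning this snapshot after the children are done
--                     agenda.append(('scan', y, snap, i))
--                     for c in reversed(v):
--                         agenda.append(('call', c))
--                     break
--     return tree
-- ===== Notes on version B (the rewrite author's own statement) =====
-- stated objective: alternative
-- what changed: A's self-recursive dict-mutating removal is replaced by an iterative worklist machine: an explicit agenda of pending removal requests and suspended snapshot scans (defunctionalised frames) drives one while-loop, so B uses no recursion and is not bound by the interpreter's recursion limit.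
import Mathlib
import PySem

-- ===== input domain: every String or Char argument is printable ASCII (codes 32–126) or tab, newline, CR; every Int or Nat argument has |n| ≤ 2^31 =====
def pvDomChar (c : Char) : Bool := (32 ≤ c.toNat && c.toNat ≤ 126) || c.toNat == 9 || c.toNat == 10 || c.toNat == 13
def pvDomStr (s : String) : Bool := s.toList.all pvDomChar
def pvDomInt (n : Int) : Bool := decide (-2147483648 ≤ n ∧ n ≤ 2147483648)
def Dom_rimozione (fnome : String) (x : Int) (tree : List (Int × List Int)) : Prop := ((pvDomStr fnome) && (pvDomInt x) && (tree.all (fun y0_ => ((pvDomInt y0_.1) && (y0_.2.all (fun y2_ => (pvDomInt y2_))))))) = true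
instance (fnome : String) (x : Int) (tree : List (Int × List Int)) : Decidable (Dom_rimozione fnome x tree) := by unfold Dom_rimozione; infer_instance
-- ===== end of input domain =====

-- B re-implements A's recursive in-place removal as an iterative worklist (explicit
-- agenda of frames); both mutate the Python dict in place and return it — the
-- equivalence proved here is about the returned mapping.

-- ===== PORT A =====
-- Python-dict primitives shared by both ports (first-match association-list view
-- of a Python dict, whose keys are unique): lookup, value overwrite, deletion.
def dget : List (Int × List Int) → Int → Option (List Int)
  | [], _ => none
  | (a, v) :: r, k => if a = k then some v else dget r k

def dset : List (Int × List Int) → Int → List Int → List (Int × List Int)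
  | [], _, _ => []
  | (a, v) :: r, k, w => if a = k then (a, w) :: r else (a, v) :: dset r k w

def derase : List (Int × List Int) → Int → List (Int × List Int)
  | [], _ => []
  | (a, v) :: r, k => if a = k then r else (a, v) :: derase r k

-- Python "if y in v: v.remove(y)"
def stripOnce (y : Int) (v : List Int) : List Int :=
  match PySem.List.remove? v y with
  | some v' => v'
  | none => v

-- A's body: `for k,v in tree.copy().items()` over the snapshot of keys, reading the
-- live list through the current tree (the snapshot's list objects ARE the tree's);
-- a snapshot key already deleted from the tree is skipped: there Python strips an
-- orphaned list object that no later read observes (keys are never re-inserted).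
-- The fuel only guards the Python recursion (each nested call sees a tree with at
-- least one key fewer, so `tree.length + 1` at top level always suffices).
mutual
def rimoA : Nat → Int → List (Int × List Int) → List (Int × List Int)
  | 0, _, t => t
  | f+1, x, t => loopA f x (t.map Prod.fst) t
  termination_by f _ _ => (f, 0, 0)

def loopA : Nat → Int → List Int → List (Int × List Int) → List (Int × List Int)
  | _, _, [], t => t
  | f, x, k :: rest, t =>
    match dget t k with
    | none => loopA f x rest t
    | some v =>
      let v' := stripOnce x v
      if k = x then loopA f x rest (childA f v' (derase (dset t k v') k))
      else loopA f x rest (dset t k v')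
  termination_by f _ snap _ => (f, 2, snap.length)

def childA : Nat → List Int → List (Int × List Int) → List (Int × List Int)
  | _, [], t => t
  | f, c :: cs, t => childA f cs (rimoA f c t)
  termination_by f cs _ => (f, 1, cs.length)
end

def rimozione (fnome : String) (x : Int) (tree : List (Int × List Int)) : List (Int × List Int) :=
  rimoA (tree.length + 1) x tree

-- ===== PORT B =====
-- B's agenda frames: a pending removal request, or a suspended scan (the value
-- being removed and the not-yet-visited suffix of its key snapshot).
inductive FrameB where
  | call : Int → FrameB
  | scan : Int → List Int → FrameB
deriving DecidableEq, Repr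

-- B's inner `while i < len(snap)` loop: runs until it deletes the key equal to y
-- (returning the stripped children list and the remaining snapshot suffix) or
-- exhausts the snapshot.
def scanB : Int → List Int → List (Int × List Int) → (List (Int × List Int)) × Option (List Int × List Int)
  | _, [], t => (t, none)
  | y, k :: rest, t =>
    match dget t k with
    | none => scanB y rest t
    | some v =>
      let v' := stripOnce y v
      if k = y then (derase (dset t k v') k, some (v', rest))
      else scanB y rest (dset t k v')

-- size of the tree: number of keys plus total length of the value lists
def phi (t : List (Int × List Int)) : Nat := t.length + (t.map (fun p => p.2.length)).sum

-- B's outer `while agenda` loop; one fuel unit per popped frame.  `3 * phi + 2`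
-- steps always suffice (proved via the potential argument in the lemmas below).
def execB : Nat → List FrameB → List (Int × List Int) → List (Int × List Int)
  | 0, _, t => t
  | _+1, [], t => t
  | f+1, FrameB.call y :: fs, t => execB f (FrameB.scan y (t.map Prod.fst) :: fs) t
  | f+1, FrameB.scan y snap :: fs, t =>
    match scanB y snap t with
    | (t1, none) => execB f fs t1
    | (t1, some (cs, rest)) => execB f (List.map FrameB.call cs ++ FrameB.scan y rest :: fs) t1

def rimozione_alt (fnome : String) (x : Int) (tree : List (Int × List Int)) : List (Int × List Int) :=
  execB (3 * phi tree + 2) [FrameB.call x] tree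

-- ===== PRECONDITION & SPEC =====
def Spec_rimozione (fnome : String) (x : Int) (tree : List (Int × List Int)) (out : List (Int × List Int)) : Prop := out = rimozione_alt fnome x tree
instance (fnome : String) (x : Int) (tree : List (Int × List Int)) (out : List (Int × List Int)) : Decidable (Spec_rimozione fnome x tree out) := by unfold Spec_rimozione; infer_instance

-- ===== CLAIM (what is proved, stated in full; the proofs are below) =====
def Claim_equal_rimozione : Prop := ∀ (fnome : String) (x : Int) (tree : List (Int × List Int)), Dom_rimozione fnome x tree → Spec_rimozione fnome x tree (rimozione fnome x tree)

-- ===== LEMMAS AND PROOFS =====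

lemma stripOnce_length (y : Int) (v : List Int) : (stripOnce y v).length ≤ v.length := by
  unfold stripOnce
  cases h : PySem.List.remove? v y with
  | none => simp
  | some v' =>
    have hm : y ∈ v := by
      by_contra hm
      rw [(PySem.List.remove?_eq_none_iff v y).mpr hm] at h
      cases h
    rw [PySem.List.remove?_eq_some_erase v y hm] at h
    have hv : v' = v.erase y := by
      cases h
      rfl
    subst hv
    have := List.length_erase_of_mem hm
    simp
    omega

lemma length_dset (t : List (Int × List Int)) (k : Int) (w : List Int) :
    (dset t k w).length = t.length := by
  induction t with
  | nil => rfl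
  | cons p r ih =>
    obtain ⟨a, v⟩ := p
    by_cases h : a = k <;> simp [dset, h, ih]

lemma dget_dset_self (t : List (Int × List Int)) (k : Int) (w v : List Int)
    (h : dget t k = some v) : dget (dset t k w) k = some w := by
  induction t with
  | nil => simp [dget] at h
  | cons p r ih =>
    obtain ⟨a, u⟩ := p
    by_cases ha : a = k
    · simp [dget, dset, ha]
    · simp [dget, dset, ha] at h ⊢
      exact ih h

lemma phi_dset (t : List (Int × List Int)) (k : Int) (w v : List Int)
    (h : dget t k = some v) : phi (dset t k w) + v.length = phi t + w.length := by
  induction t with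
  | nil => simp [dget] at h
  | cons p r ih =>
    obtain ⟨a, u⟩ := p
    by_cases ha : a = k
    · simp [dget, ha] at h
      subst h
      simp [dset, ha, phi]
      omega
    · simp [dget, ha] at h
      have := ih h
      simp [dset, ha, phi] at this ⊢
      omega

lemma phi_derase (t : List (Int × List Int)) (k : Int) (v : List Int)
    (h : dget t k = some v) : phi (derase t k) + 1 + v.length = phi t := by
  induction t with
  | nil => simp [dget] at h
  | cons p r ih =>
    obtain ⟨a, u⟩ := p
    by_cases ha : a = k
    · simp [dget, ha] at h
      subst h
      simp [derase, ha, phi]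
      omega
    · simp [dget, ha] at h
      have := ih h
      simp [derase, ha, phi] at this ⊢
      omega

lemma length_derase (t : List (Int × List Int)) (k : Int) (v : List Int)
    (h : dget t k = some v) : (derase t k).length + 1 = t.length := by
  induction t with
  | nil => simp [dget] at h
  | cons p r ih =>
    obtain ⟨a, u⟩ := p
    by_cases ha : a = k
    · simp [derase, ha]
    · simp [dget, ha] at h
      have := ih h
      simp [derase, ha]
      omega

lemma execB_nil (f : Nat) (t : List (Int × List Int)) : execB f [] t = t := by
  cases f <;> rfl

lemma loopA_nil_tree (f : Nat) (y : Int) (snap : List Int) : loopA f y snap [] = [] := by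
  induction snap with
  | nil => simp [loopA]
  | cons k rest ih => simp [loopA, dget, ih]

lemma scanB_nil_tree (y : Int) (snap : List Int) : scanB y snap [] = ([], none) := by
  induction snap with
  | nil => rfl
  | cons k rest ih => simp [scanB, dget, ih]

-- The three statements of the simulation invariant (B's machine, run on one frame,
-- computes exactly what the corresponding piece of A computes, consuming a number
-- of fuel steps bounded through the potential phi):
def CALLP (n : Nat) : Prop := ∀ (t : List (Int × List Int)), t.length < n →
  ∀ (y : Int) (f : Nat), t.length ≤ f → ∀ (fs : List FrameB) (fb : Nat), 2 + 3 * phi t ≤ fb →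
  ∃ c, 1 ≤ c ∧ c + 3 * phi (rimoA (f+1) y t) ≤ 2 + 3 * phi t ∧
    (rimoA (f+1) y t).length ≤ t.length ∧
    execB fb (FrameB.call y :: fs) t = execB (fb - c) fs (rimoA (f+1) y t)

def CHILDP (n : Nat) : Prop := ∀ (cs : List Int) (f : Nat) (t : List (Int × List Int)),
  t.length < n → t.length < f → ∀ (fs : List FrameB) (fb : Nat), 2 * cs.length + 3 * phi t ≤ fb →
  ∃ c, c + 3 * phi (childA f cs t) ≤ 2 * cs.length + 3 * phi t ∧
    (childA f cs t).length ≤ t.length ∧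
    execB fb (List.map FrameB.call cs ++ fs) t = execB (fb - c) fs (childA f cs t)

def SCANP (n : Nat) : Prop := ∀ (snap : List Int) (y : Int) (f : Nat) (t : List (Int × List Int)),
  t.length ≤ n → t.length ≤ f → ∀ (fs : List FrameB) (fb : Nat), 1 + 3 * phi t ≤ fb →
  ∃ c, 1 ≤ c ∧ c + 3 * phi (loopA f y snap t) ≤ 1 + 3 * phi t ∧
    (loopA f y snap t).length ≤ t.length ∧
    execB fb (FrameB.scan y snap :: fs) t = execB (fb - c) fs (loopA f y snap t)

lemma master (n : Nat) : CALLP n ∧ CHILDP n ∧ SCANP n := by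
  induction n with
  | zero =>
    refine ⟨?_, ?_, ?_⟩
    · intro t ht
      exact absurd ht (Nat.not_lt_zero _)
    · intro cs f t ht
      exact absurd ht (Nat.not_lt_zero _)
    · intro snap y f t ht hf fs fb hfb
      have hte : t = [] := List.length_eq_zero_iff.mp (Nat.le_zero.mp ht)
      subst hte
      obtain ⟨g, rfl⟩ : ∃ g, fb = g + 1 := ⟨fb - 1, by omega⟩
      refine ⟨1, le_refl 1, by simp [loopA_nil_tree], by simp [loopA_nil_tree], ?_⟩
      simp [execB, scanB_nil_tree, loopA_nil_tree]
  | succ n ih =>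
    obtain ⟨ihC, ihH, ihS⟩ := ih
    have hC : CALLP (n + 1) := by
      intro t ht y f hf fs fb hfb
      obtain ⟨g, rfl⟩ : ∃ g, fb = g + 1 := ⟨fb - 1, by omega⟩
      have hr : rimoA (f + 1) y t = loopA f y (t.map Prod.fst) t := by rw [rimoA]
      obtain ⟨c, hc1, hc2, hc3, hc4⟩ :=
        ihS (t.map Prod.fst) y f t (by omega) hf fs g (by omega)
      refine ⟨c + 1, by omega, by rw [hr]; omega, by rw [hr]; exact hc3, ?_⟩
      have hstep : execB (g + 1) (FrameB.call y :: fs) t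
          = execB g (FrameB.scan y (t.map Prod.fst) :: fs) t := by simp [execB]
      rw [hr, hstep, hc4]
      congr 1
      omega
    have hH : CHILDP (n + 1) := by
      intro cs
      induction cs with
      | nil =>
        intro f t ht hf fs fb hfb
        refine ⟨0, by simp [childA], by simp [childA], ?_⟩
        simp [childA]
      | cons c cs ihcs =>
        intro f t ht hf fs fb hfb
        obtain ⟨f', rfl⟩ : ∃ f', f = f' + 1 := ⟨f - 1, by omega⟩
        obtain ⟨c1, h11, h12, h13, h14⟩ :=
          hC t ht c f' (by omega) (List.map FrameB.call cs ++ fs) fb (by simp at hfb ⊢; omega)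
        have h1n : (rimoA (f' + 1) c t).length < n + 1 := lt_of_le_of_lt h13 ht
        have h1f : (rimoA (f' + 1) c t).length < f' + 1 := lt_of_le_of_lt h13 hf
        obtain ⟨c2, h21, h22, h23⟩ :=
          ihcs (f' + 1) (rimoA (f' + 1) c t) h1n h1f fs (fb - c1) (by simp at hfb ⊢; omega)
        have hch : childA (f' + 1) (c :: cs) t = childA (f' + 1) cs (rimoA (f' + 1) c t) := by
          rw [childA]
        refine ⟨c1 + c2, ?_, ?_, ?_⟩
        · rw [hch]; simp at hfb ⊢; omega
        · rw [hch]; exact le_trans h22 h13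
        · rw [hch]
          have : List.map FrameB.call (c :: cs) ++ fs
              = FrameB.call c :: (List.map FrameB.call cs ++ fs) := by simp
          rw [this, h14, h23]
          congr 1
          omega
    have hS : SCANP (n + 1) := by
      intro snap
      induction snap with
      | nil =>
        intro y f t ht hf fs fb hfb
        obtain ⟨g, rfl⟩ : ∃ g, fb = g + 1 := ⟨fb - 1, by omega⟩
        refine ⟨1, le_refl 1, by rw [loopA], by rw [loopA], ?_⟩
        simp [execB, scanB, loopA]
      | cons k rest ihs =>
        intro y f t ht hf fs fb hfb
        cases hdg : dget t k with
        | none =>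
          have hloop : loopA f y (k :: rest) t = loopA f y rest t := by
            rw [loopA, hdg]
          obtain ⟨c, hc1, hc2, hc3, hc4⟩ := ihs y f t ht hf fs fb hfb
          refine ⟨c, hc1, by rw [hloop]; exact hc2, by rw [hloop]; exact hc3, ?_⟩
          rw [hloop]
          obtain ⟨g, rfl⟩ : ∃ g, fb = g + 1 := ⟨fb - 1, by omega⟩
          have hscan : scanB y (k :: rest) t = scanB y rest t := by rw [scanB, hdg]
          have hstep : execB (g + 1) (FrameB.scan y (k :: rest) :: fs) t
              = execB (g + 1) (FrameB.scan y rest :: fs) t := by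
            simp only [execB, hscan]
          rw [hstep, hc4]
        | some v =>
          by_cases hk : k = y
          · subst hk
            obtain ⟨g, rfl⟩ : ∃ g, fb = g + 1 := ⟨fb - 1, by omega⟩
            have hget1 : dget (dset t k (stripOnce k v)) k = some (stripOnce k v) :=
              dget_dset_self t k (stripOnce k v) v hdg
            have hphit1 : phi (dset t k (stripOnce k v)) + v.length
                = phi t + (stripOnce k v).length := phi_dset t k (stripOnce k v) v hdg
            have hlent1 : (dset t k (stripOnce k v)).length = t.length := length_dset t k (stripOnce k v)
            have hphitd : phi (derase (dset t k (stripOnce k v)) k) + 1 + (stripOnce k v).length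
                = phi (dset t k (stripOnce k v)) := phi_derase _ k (stripOnce k v) hget1
            have hlentd : (derase (dset t k (stripOnce k v)) k).length + 1
                = (dset t k (stripOnce k v)).length := length_derase _ k (stripOnce k v) hget1
            have hstriplen : (stripOnce k v).length ≤ v.length := stripOnce_length k v
            have hstep : execB (g + 1) (FrameB.scan k (k :: rest) :: fs) t
                = execB g (List.map FrameB.call (stripOnce k v)
                    ++ FrameB.scan k rest :: fs) (derase (dset t k (stripOnce k v)) k) := by
              have hscan : scanB k (k :: rest) t
                  = (derase (dset t k (stripOnce k v)) k, some (stripOnce k v, rest)) := by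
                rw [scanB, hdg]
                simp
              simp only [execB, hscan]
            have htdn : (derase (dset t k (stripOnce k v)) k).length < n + 1 := by omega
            have htdf : (derase (dset t k (stripOnce k v)) k).length < f := by omega
            obtain ⟨c1, h11, h12, h13⟩ :=
              hH (stripOnce k v) f (derase (dset t k (stripOnce k v)) k) htdn htdf
                (FrameB.scan k rest :: fs) g (by omega)
            have hta_len : (childA f (stripOnce k v) (derase (dset t k (stripOnce k v)) k)).length
                ≤ t.length - 1 := by omega
            obtain ⟨c2, h21, h22, h23, h24⟩ :=
              ihs k f (childA f (stripOnce k v) (derase (dset t k (stripOnce k v)) k))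
                (by omega) (by omega) fs (g - c1) (by omega)
            have hloop : loopA f k (k :: rest) t
                = loopA f k rest (childA f (stripOnce k v) (derase (dset t k (stripOnce k v)) k)) := by
              rw [loopA, hdg]
              simp
            refine ⟨1 + c1 + c2, by omega, by rw [hloop]; omega, by rw [hloop]; omega, ?_⟩
            rw [hloop, hstep, h13, h24]
            congr 1
            omega
          · have hphit1 : phi (dset t k (stripOnce y v)) + v.length
                = phi t + (stripOnce y v).length := phi_dset t k (stripOnce y v) v hdg
            have hlent1 : (dset t k (stripOnce y v)).length = t.length := length_dset t k (stripOnce y v)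
            have hstriplen : (stripOnce y v).length ≤ v.length := stripOnce_length y v
            have hloop : loopA f y (k :: rest) t = loopA f y rest (dset t k (stripOnce y v)) := by
              rw [loopA, hdg]
              simp [hk]
            obtain ⟨c, hc1, hc2, hc3, hc4⟩ :=
              ihs y f (dset t k (stripOnce y v)) (by omega) (by omega) fs fb (by omega)
            refine ⟨c, hc1, by rw [hloop]; omega, by rw [hloop]; omega, ?_⟩
            rw [hloop]
            obtain ⟨g, rfl⟩ : ∃ g, fb = g + 1 := ⟨fb - 1, by omega⟩
            have hscan : scanB y (k :: rest) t = scanB y rest (dset t k (stripOnce y v)) := by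
              rw [scanB, hdg]
              simp [hk]
            have hstep : execB (g + 1) (FrameB.scan y (k :: rest) :: fs) t
                = execB (g + 1) (FrameB.scan y rest :: fs) (dset t k (stripOnce y v)) := by
              simp only [execB, hscan]
            rw [hstep, hc4]
    exact ⟨hC, hH, hS⟩

theorem rimozione_spec_aux (fnome : String) (x : Int) (tree : List (Int × List Int)) :
    rimozione fnome x tree = rimozione_alt fnome x tree := by
  obtain ⟨c, hc1, hc2, hc3, hc4⟩ :=
    (master (tree.length + 1)).1 tree (by omega) x tree.length (le_refl _) []
      (3 * phi tree + 2) (by omega)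
  unfold rimozione rimozione_alt
  rw [hc4, execB_nil]

-- ===== VERDICT (by name: the statement is the Claim_ definition above) =====
theorem rimozione_spec : Claim_equal_rimozione := by
  intro fnome x tree _
  unfold Spec_rimozione
  exact rimozione_spec_aux fnome x tree
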